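-- pv_equiv track=rewrite | github.com/daniel-reich/ubiquitous-fiesta | Y4gwcGfcGb3SKz6Tu_8.py | max_separator
-- ===== SOURCE A (Python) =====
-- def max_separator(txt):
--   new=[]
--   for al in txt:
--     if txt.count(al)==2:
--       first=txt.index(al)
--       second=txt.index(al,first+1)
--       new.append(txt[(first):(second+1)])
--     elif txt.count(al)>=3:
--       first=txt.index(al)
--       second=txt.index(al,first+1)
--       third=txt.index(al,second+1)
--       new.append(txt[(first):(second+1)])
--       new.append(txt[(second):(third+1)])
--   if new==[]:
--     return([])
--   else:
--     maxx=max([len(l) for l in new])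
--     return(sorted(list(set(sub[0] for sub in new if len(sub)==maxx))))
-- ===== SOURCE B (Python) =====
-- def max_separator(txt):
--     pos = {}
--     for i, c in enumerate(txt):
--         pos.setdefault(c, []).append(i)
--     cand = []
--     for c, ps in pos.items():
--         if len(ps) >= 2:
--             m = ps[1] - ps[0] + 1
--             if len(ps) >= 3:
--                 m = max(m, ps[2] - ps[1] + 1)
--             cand.append((c, m))
--     if not cand:
--         return []
--     best = max(m for _, m in cand)
--     return sorted(c for c, m in cand if m == best)
-- ===== Notes on version B (the rewrite author's own statement) =====
-- stated objective: faster
-- what changed: B builds a char->positions dict in one pass and processes each distinct character once (first three positions give the candidate segment lengths), instead of A's per-position count/index/slice rescans of the whole string.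
import Mathlib
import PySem

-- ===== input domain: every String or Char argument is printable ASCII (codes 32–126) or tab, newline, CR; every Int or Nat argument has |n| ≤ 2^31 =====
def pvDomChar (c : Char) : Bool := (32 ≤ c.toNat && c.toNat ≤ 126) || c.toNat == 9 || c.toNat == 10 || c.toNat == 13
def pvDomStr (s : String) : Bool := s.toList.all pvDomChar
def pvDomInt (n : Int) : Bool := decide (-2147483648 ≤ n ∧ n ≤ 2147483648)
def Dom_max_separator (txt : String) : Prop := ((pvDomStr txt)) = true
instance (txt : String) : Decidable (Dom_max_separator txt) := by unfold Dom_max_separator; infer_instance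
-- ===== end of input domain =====

-- B replaces A's per-position count/index/slice rescans by a one-pass char->positions
-- dictionary processed once per distinct character (objective: faster; measured).


-- ===== PORT A =====
-- txt.index(al, start): first index of al at or after start; under A's count guards the
-- character is always found, so the (unreachable) not-found case returns 0.
def pyIndexFrom (l : List Char) (c : Char) (start : Nat) : Nat :=
  match PySem.List.index? (l.drop start) c with
  | some i => start + i
  | none => 0

-- Python's 1-character strings are modelled as Char while computing; String.ofList [·] after
-- the final sort only restores the List String return type (order is the same).
def max_separator (txt : String) : List String :=
  let l := txt.toList
  let new : List (List Char) := l.foldl (fun new al =>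
    if PySem.List.count l al == 2 then
      let first := pyIndexFrom l al 0
      let second := pyIndexFrom l al (first + 1)
      new ++ [PySem.List.slice l (some (first : Int)) (some ((second : Int) + 1))]
    else if 3 ≤ PySem.List.count l al then
      let first := pyIndexFrom l al 0
      let second := pyIndexFrom l al (first + 1)
      let third := pyIndexFrom l al (second + 1)
      (new ++ [PySem.List.slice l (some (first : Int)) (some ((second : Int) + 1))]) ++
        [PySem.List.slice l (some (second : Int)) (some ((third : Int) + 1))]
    else new) []
  if new == [] then []
  else
    let maxx : Int := (PySem.List.max? (new.map (fun s => (s.length : Int))) (fun y => y)).getD 0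
    -- sub[0]: the subs are nonempty here, so the ' ' default of pyGet? is never used
    (PySem.List.sorted (PySem.Set.ofList ((new.filter (fun sub => (sub.length : Int) == maxx)).map
        (fun sub => (PySem.List.pyGet? sub 0).getD ' '))) (fun c => c) false).map (fun c => String.ofList [c])

-- ===== PORT B =====
-- m = ps[1]-ps[0]+1; if len(ps) >= 3: m = max(m, ps[2]-ps[1]+1)   (ps in range: len(ps) >= 2)
def bSegLen (ps : List Int) : Int :=
  let m := PySem.List.pyGetD ps 1 0 - PySem.List.pyGetD ps 0 0 + 1
  if 3 ≤ ps.length then max m (PySem.List.pyGetD ps 2 0 - PySem.List.pyGetD ps 1 0 + 1) else m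

def max_separator_alt (txt : String) : List String :=
  let l := txt.toList
  -- pos.setdefault(c, []).append(i)  ==  pos[c] = pos.get(c, []) + [i]
  let pos : PySem.Dict Char (List Int) :=
    (PySem.List.enumerate l).foldl (fun d q => d.modify q.2 [] (· ++ [q.1])) PySem.Dict.empty
  let cand : List (Char × Int) := pos.items.foldl (fun cand p =>
    if 2 ≤ p.2.length then cand ++ [(p.1, bSegLen p.2)] else cand) []
  if cand == [] then []
  else
    let best : Int := (PySem.List.max? (cand.map (fun p => p.2)) (fun y => y)).getD 0
    (PySem.List.sorted ((cand.filter (fun p => p.2 == best)).map (fun p => p.1))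
        (fun c => c) false).map (fun c => String.ofList [c])

-- ===== PRECONDITION & SPEC =====
def Spec_max_separator (txt : String) (out : List String) : Prop := out = max_separator_alt txt
instance (txt : String) (out : List String) : Decidable (Spec_max_separator txt out) := by unfold Spec_max_separator; infer_instance

-- ===== CLAIM (what is proved, stated in full; the proofs are below) =====
def Claim_equal_max_separator : Prop := ∀ (txt : String), Dom_max_separator txt → Spec_max_separator txt (max_separator txt)

-- ===== LEMMAS AND PROOFS =====

-- positions (0-based) of c in l, shifted by s
def occList (l : List Char) (c : Char) (s : Nat) : List Nat :=
  match l with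
  | [] => []
  | x :: xs => if x = c then s :: occList xs c (s + 1) else occList xs c (s + 1)

theorem occ_shift (l : List Char) (c : Char) (s : Nat) :
    occList l c s = (occList l c 0).map (· + s) := by
  induction l generalizing s with
  | nil => simp [occList]
  | cons x xs ih =>
    simp only [occList]
    rw [ih (s + 1), ih 1]
    split <;> simp [List.map_map, Function.comp_def, Nat.add_comm, Nat.add_left_comm]

theorem occ_mem {l : List Char} {c : Char} {j : Nat} :
    j ∈ occList l c 0 ↔ ∃ h : j < l.length, l[j] = c := by
  induction l generalizing j with
  | nil => simp [occList]
  | cons x xs ih =>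
    simp only [occList, occ_shift xs c 1]
    rcases j with _ | j
    · by_cases hx : x = c <;> simp [hx]
    · by_cases hx : x = c <;> simp [hx, ih, Nat.succ_lt_succ_iff]

theorem occ_pairwise (l : List Char) (c : Char) : (occList l c 0).Pairwise (· < ·) := by
  induction l with
  | nil => simp [occList]
  | cons x xs ih =>
    simp only [occList, occ_shift xs c 1]
    by_cases hx : x = c
    · simp only [hx, if_pos rfl]
      refine List.Pairwise.cons ?_ ?_
      · intro j hj; simp only [List.mem_map] at hj; omega
      · exact (List.pairwise_map).2 (ih.imp (by omega))
    · simp only [if_neg hx]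
      exact (List.pairwise_map).2 (ih.imp (by omega))

theorem occ_count (l : List Char) (c : Char) : (occList l c 0).length = l.count c := by
  induction l with
  | nil => simp [occList]
  | cons x xs ih =>
    simp only [occList, occ_shift xs c 1, List.count_cons]
    by_cases hx : x = c <;> simp [hx, ih, beq_iff_eq]

theorem occ_index? (l : List Char) (c : Char) :
    PySem.List.index? l c = (occList l c 0).head? := by
  induction l with
  | nil => simp [occList, PySem.List.index?_eq_none_iff]
  | cons x xs ih =>
    simp only [occList, occ_shift xs c 1]
    by_cases hx : x = c
    · subst hx; rw [PySem.List.index?_cons_self]; simp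
    · rw [PySem.List.index?_cons_of_ne _ hx, ih]
      simp [hx, List.head?_map]

theorem occ_drop (l : List Char) (c : Char) (n : Nat) :
    occList (l.drop n) c 0 =
      (occList l c 0).filterMap (fun j => if n ≤ j then some (j - n) else none) := by
  induction l generalizing n with
  | nil => simp [occList]
  | cons x xs ih =>
    rcases n with _ | n
    · simp only [List.drop_zero]
      have h1 : (fun j : Nat => if 0 ≤ j then some (j - 0) else none) = (some ∘ fun j => j) := by
        funext j; simp
      rw [h1, List.filterMap_eq_map]; simp
    · simp only [List.drop_succ_cons, ih n]
      have harg : ∀ j : Nat,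
          (if n + 1 ≤ j + 1 then some (j + 1 - (n + 1)) else none)
            = (if n ≤ j then some (j - n) else none) := by
        intro j; by_cases hn : n ≤ j
        · rw [if_pos (by omega), if_pos hn]; congr 1; omega
        · rw [if_neg (by omega), if_neg hn]
      simp only [occList, occ_shift xs c 1]
      by_cases hx : x = c
      · rw [if_pos hx]
        rw [List.filterMap_cons_none (by simp), List.filterMap_map]
        apply List.filterMap_congr
        intro j hj
        simpa using harg j
      · rw [if_neg hx]
        rw [List.filterMap_map]
        apply List.filterMap_congr
        intro j hj
        simpa using harg j

-- what A's candidate segments for character c are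
def segSpec (l : List Char) (c : Char) : List (List Char) :=
  match occList l c 0 with
  | i0 :: i1 :: [] => [(l.drop i0).take (i1 + 1 - i0)]
  | i0 :: i1 :: i2 :: _ => [(l.drop i0).take (i1 + 1 - i0), (l.drop i1).take (i2 + 1 - i1)]
  | _ => []

-- the segment lengths, as Ints
def mLens (l : List Char) (c : Char) : List Int :=
  match occList l c 0 with
  | i0 :: i1 :: [] => [(i1 : Int) - (i0 : Int) + 1]
  | i0 :: i1 :: i2 :: _ => [(i1 : Int) - (i0 : Int) + 1, (i2 : Int) - (i1 : Int) + 1]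
  | _ => []


def occInt (l : List Char) (c : Char) : List Int := (occList l c 0).map (fun j => (j : Int))

def candB (l : List Char) : List (Char × Int) :=
  ((PySem.Set.ofList l).filter (fun c => decide (2 ≤ (occInt l c).length))).map
    (fun c => (c, bSegLen (occInt l c)))

theorem idx_first {l : List Char} {c : Char} {i0 : Nat} {rest : List Nat}
    (h : occList l c 0 = i0 :: rest) : pyIndexFrom l c 0 = i0 := by
  have : PySem.List.index? (l.drop 0) c = some i0 := by
    rw [List.drop_zero, occ_index?, h]; rfl
  unfold pyIndexFrom
  rw [this]
  simp

theorem idx_second {l : List Char} {c : Char} {i0 i1 : Nat} {rest : List Nat}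
    (h : occList l c 0 = i0 :: i1 :: rest) : pyIndexFrom l c (i0 + 1) = i1 := by
  have hp := occ_pairwise l c
  rw [h, List.pairwise_cons] at hp
  have h01 : i0 < i1 := hp.1 i1 (by simp)
  have hidx : PySem.List.index? (l.drop (i0 + 1)) c = some (i1 - (i0 + 1)) := by
    rw [occ_index?, occ_drop, h,
      List.filterMap_cons_none (by rw [if_neg (by omega)]),
      List.filterMap_cons_some (by rw [if_pos (by omega)])]
    rfl
  unfold pyIndexFrom
  rw [hidx]
  simp
  omega

theorem idx_third {l : List Char} {c : Char} {i0 i1 i2 : Nat} {rest : List Nat}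
    (h : occList l c 0 = i0 :: i1 :: i2 :: rest) : pyIndexFrom l c (i1 + 1) = i2 := by
  have hp := occ_pairwise l c
  rw [h, List.pairwise_cons] at hp
  have h01 : i0 < i1 := hp.1 i1 (by simp)
  have hp2 := hp.2
  rw [List.pairwise_cons] at hp2
  have h12 : i1 < i2 := hp2.1 i2 (by simp)
  have hidx : PySem.List.index? (l.drop (i1 + 1)) c = some (i2 - (i1 + 1)) := by
    rw [occ_index?, occ_drop, h,
      List.filterMap_cons_none (by rw [if_neg (by omega)]),
      List.filterMap_cons_none (by rw [if_neg (by omega)]),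
      List.filterMap_cons_some (by rw [if_pos (by omega)])]
    rfl
  unfold pyIndexFrom
  rw [hidx]
  simp
  omega

-- basic facts about an occurrence position
theorem occ_pos_facts {l : List Char} {c : Char} {j : Nat} (hj : j ∈ occList l c 0) :
    j < l.length ∧ l[j]? = some c := by
  rcases occ_mem.1 hj with ⟨h, hc⟩
  exact ⟨h, by simp [List.getElem?_eq_getElem h, hc]⟩

theorem pyGet?_zero {α : Type} (xs : List α) : PySem.List.pyGet? xs (0 : Int) = xs[0]? := by
  simpa using PySem.List.pyGet?_natCast xs 0

theorem seg_take_head {l : List Char} {c : Char} {i j : Nat}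
    (hij : i < j) (hjl : j < l.length) (hc : l[i]? = some c) :
    (PySem.List.pyGet? ((l.drop i).take (j + 1 - i)) 0).getD ' ' = c := by
  rw [pyGet?_zero, List.getElem?_take, if_pos (by omega), List.getElem?_drop]
  simp only [Nat.add_zero, hc, Option.getD_some]

-- A's loop appends exactly segSpec for each character
theorem newA_eq (l : List Char) :
    l.foldl (fun new al =>
      if PySem.List.count l al == 2 then
        let first := pyIndexFrom l al 0
        let second := pyIndexFrom l al (first + 1)
        new ++ [PySem.List.slice l (some (first : Int)) (some ((second : Int) + 1))]
      else if 3 ≤ PySem.List.count l al then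
        let first := pyIndexFrom l al 0
        let second := pyIndexFrom l al (first + 1)
        let third := pyIndexFrom l al (second + 1)
        (new ++ [PySem.List.slice l (some (first : Int)) (some ((second : Int) + 1))]) ++
          [PySem.List.slice l (some (second : Int)) (some ((third : Int) + 1))]
      else new) [] = l.flatMap (segSpec l) := by
  have hbody : (fun (new : List (List Char)) (al : Char) =>
      if PySem.List.count l al == 2 then
        let first := pyIndexFrom l al 0
        let second := pyIndexFrom l al (first + 1)
        new ++ [PySem.List.slice l (some (first : Int)) (some ((second : Int) + 1))]
      else if 3 ≤ PySem.List.count l al then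
        let first := pyIndexFrom l al 0
        let second := pyIndexFrom l al (first + 1)
        let third := pyIndexFrom l al (second + 1)
        (new ++ [PySem.List.slice l (some (first : Int)) (some ((second : Int) + 1))]) ++
          [PySem.List.slice l (some (second : Int)) (some ((third : Int) + 1))]
      else new) = fun new al => new ++ segSpec l al := by
    funext new al
    rcases hocc : occList l al 0 with _ | ⟨i0, _ | ⟨i1, _ | ⟨i2, rest⟩⟩⟩
    · have hc : List.count al l = 0 := by rw [← occ_count, hocc]; rfl
      simp [PySem.List.count_eq, hc, segSpec, hocc]
    · have hc : List.count al l = 1 := by rw [← occ_count, hocc]; rfl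
      simp [PySem.List.count_eq, hc, segSpec, hocc]
    · have hc : List.count al l = 2 := by rw [← occ_count, hocc]; rfl
      have e1 := idx_first hocc
      have e2 := idx_second hocc
      have hcast : ∀ k : Nat, ((k : Int) + 1) = ((k + 1 : Nat) : Int) := by intro k; push_cast; ring
      rw [if_pos (by simp [PySem.List.count_eq, hc])]
      simp only [e1, e2, hcast i1, PySem.List.slice_natCast]
      unfold segSpec
      rw [hocc]
    · have hc : List.count al l = rest.length + 3 := by
        rw [← occ_count, hocc]; simp
      have e1 := idx_first hocc
      have e2 := idx_second hocc
      have e3 := idx_third hocc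
      have hcast : ∀ k : Nat, ((k : Int) + 1) = ((k + 1 : Nat) : Int) := by intro k; push_cast; ring
      rw [if_neg (by simp [PySem.List.count_eq, hc]),
        if_pos (by simp [PySem.List.count_eq, hc])]
      simp only [e1, e2, e3, hcast i1, hcast i2, PySem.List.slice_natCast]
      unfold segSpec
      rw [hocc]
      simp
  rw [hbody, PySem.List.foldl_append_eq_flatMap]
  simp

theorem occ_sorted_facts {l : List Char} {c : Char} {i0 i1 : Nat} {rest : List Nat}
    (h : occList l c 0 = i0 :: i1 :: rest) :
    i0 < i1 ∧ i1 < l.length ∧ l[i0]? = some c ∧ l[i1]? = some c := by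
  have hp := occ_pairwise l c
  rw [h, List.pairwise_cons] at hp
  have h01 : i0 < i1 := hp.1 i1 (by simp)
  have hm0 := occ_pos_facts (l := l) (c := c) (j := i0) (by rw [h]; simp)
  have hm1 := occ_pos_facts (l := l) (c := c) (j := i1) (by rw [h]; simp)
  exact ⟨h01, hm1.1, hm0.2, hm1.2⟩

theorem occ_sorted_facts3 {l : List Char} {c : Char} {i0 i1 i2 : Nat} {rest : List Nat}
    (h : occList l c 0 = i0 :: i1 :: i2 :: rest) :
    i1 < i2 ∧ i2 < l.length ∧ l[i2]? = some c := by
  have hp := occ_pairwise l c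
  rw [h, List.pairwise_cons] at hp
  have hp2 := hp.2
  rw [List.pairwise_cons] at hp2
  have h12 : i1 < i2 := hp2.1 i2 (by simp)
  have hm2 := occ_pos_facts (l := l) (c := c) (j := i2) (by rw [h]; simp)
  exact ⟨h12, hm2.1, hm2.2⟩

theorem seg_lens (l : List Char) (c : Char) :
    (segSpec l c).map (fun s => (s.length : Int)) = mLens l c := by
  unfold segSpec mLens
  rcases hocc : occList l c 0 with _ | ⟨i0, _ | ⟨i1, _ | ⟨i2, rest⟩⟩⟩
  · simp
  · simp
  · obtain ⟨h01, h1l, _, _⟩ := occ_sorted_facts hocc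
    simp only [List.map_cons, List.map_nil, List.length_take, List.length_drop]
    norm_num
    omega
  · obtain ⟨h01, h1l, _, _⟩ := occ_sorted_facts hocc
    obtain ⟨h12, h2l, _⟩ := occ_sorted_facts3 hocc
    simp only [List.map_cons, List.map_nil, List.length_take, List.length_drop]
    norm_num
    omega

theorem seg_head {l : List Char} {c : Char} {sub : List Char} (hs : sub ∈ segSpec l c) :
    (PySem.List.pyGet? sub 0).getD ' ' = c := by
  unfold segSpec at hs
  rcases hocc : occList l c 0 with _ | ⟨i0, _ | ⟨i1, _ | ⟨i2, rest⟩⟩⟩ <;> rw [hocc] at hs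
  · simp at hs
  · simp at hs
  · obtain ⟨h01, h1l, h0c, _⟩ := occ_sorted_facts hocc
    simp only [List.mem_singleton] at hs
    rw [hs]; exact seg_take_head h01 h1l h0c
  · obtain ⟨h01, h1l, h0c, h1c⟩ := occ_sorted_facts hocc
    obtain ⟨h12, h2l, _⟩ := occ_sorted_facts3 hocc
    simp only [List.mem_cons, List.not_mem_nil, or_false] at hs
    rcases hs with hs | hs
    · rw [hs]; exact seg_take_head h01 h1l h0c
    · rw [hs]; exact seg_take_head h12 h2l h1c

theorem mLens_ne_nil_iff (l : List Char) (c : Char) :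
    mLens l c ≠ [] ↔ 2 ≤ (occList l c 0).length := by
  unfold mLens
  rcases hocc : occList l c 0 with _ | ⟨i0, _ | ⟨i1, _ | ⟨i2, rest⟩⟩⟩ <;> simp

theorem segSpec_nil_iff (l : List Char) (c : Char) :
    segSpec l c = [] ↔ (occList l c 0).length < 2 := by
  unfold segSpec
  rcases hocc : occList l c 0 with _ | ⟨i0, _ | ⟨i1, _ | ⟨i2, rest⟩⟩⟩ <;> simp

theorem bSegLen_spec {l : List Char} {c : Char} (h2 : 2 ≤ (occList l c 0).length) :
    bSegLen (occInt l c) ∈ mLens l c ∧ ∀ y ∈ mLens l c, y ≤ bSegLen (occInt l c) := by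
  rcases hocc : occList l c 0 with _ | ⟨i0, _ | ⟨i1, _ | ⟨i2, rest⟩⟩⟩ <;> rw [hocc] at h2
  · simp at h2
  · simp at h2
  · have hI : occInt l c = [(i0 : Int), (i1 : Int)] := by unfold occInt; rw [hocc]; rfl
    have hM : mLens l c = [(i1 : Int) - (i0 : Int) + 1] := by unfold mLens; rw [hocc]
    rw [hI, hM]
    unfold bSegLen
    simp [PySem.List.pyGetD_ofNat', List.getD]
  · have hI : occInt l c = (i0 : Int) :: (i1 : Int) :: (i2 : Int) :: rest.map (fun j => (j : Int)) := by
      unfold occInt; rw [hocc]; rfl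
    have hM : mLens l c = [(i1 : Int) - (i0 : Int) + 1, (i2 : Int) - (i1 : Int) + 1] := by
      unfold mLens; rw [hocc]
    rw [hI, hM]
    unfold bSegLen
    simp only [PySem.List.pyGetD_ofNat', List.getD, List.getElem?_cons_zero,
      List.getElem?_cons_succ, Option.getD_some, List.length_cons]
    rw [if_pos (by omega)]
    constructor
    · rcases max_choice ((i1 : Int) - i0 + 1) ((i2 : Int) - i1 + 1) with hm | hm <;> rw [hm] <;> simp
    · intro y hy
      simp only [List.mem_cons, List.not_mem_nil, or_false] at hy
      rcases hy with hy | hy <;> rw [hy]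
      · exact le_max_left _ _
      · exact le_max_right _ _

theorem enum_occ (l : List Char) (c : Char) : ∀ s : Nat,
    ((PySem.List.enumerate l (s : Int)).filter (fun q => q.2 == c)).map (fun q => q.1)
      = (occList l c s).map (fun j => (j : Int)) := by
  induction l with
  | nil => intro s; simp [occList, PySem.List.enumerate_nil]
  | cons x xs ih =>
    intro s
    rw [PySem.List.enumerate_cons]
    have hs1 : ((s : Int) + 1) = ((s + 1 : Nat) : Int) := by push_cast; ring
    by_cases hx : x = c
    · simp only [List.filter_cons, hx, beq_self_eq_true, if_pos, List.map_cons, occList, if_true]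
      rw [hs1, ih (s + 1)]
      simp
    · simp only [List.filter_cons, occList, if_neg hx]
      rw [hs1]
      simp only [show (x == c) = false by simp [hx], Bool.false_eq_true, if_false]
      rw [ih (s + 1)]

-- B's dict-and-loop produces exactly candB
theorem cand_eq (l : List Char) :
    (((PySem.List.enumerate l).foldl
        (fun d q => d.modify q.2 [] (· ++ [q.1])) PySem.Dict.empty).items).foldl
      (fun cand p => if 2 ≤ p.2.length then cand ++ [(p.1, bSegLen p.2)] else cand) []
      = candB l := by
  set pos := (PySem.List.enumerate l).foldl
      (fun d q => d.modify q.2 [] (· ++ [q.1])) PySem.Dict.empty with hpos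
  have hkeys : pos.keys = PySem.Set.ofList l := by
    rw [hpos, PySem.Dict.keys_foldl_modify_key (PySem.List.enumerate l) (fun q => q.2)
      ([] : List Int) (fun d q => (· ++ [q.1])) PySem.Dict.empty]
    rw [PySem.List.map_snd_enumerate]
    rw [PySem.Dict.keys_empty]
    exact PySem.Set.update_empty l
  have hnodup : pos.keys.Nodup := by
    rw [hkeys]; exact PySem.Set.nodup_ofList l
  have hget : ∀ c, pos.getD c [] = occInt l c := by
    intro c
    have hfold : pos = ((PySem.List.enumerate l).map (fun q => (q.2, q.1))).foldl
        (fun d p => d.modify p.1 [] (· ++ [p.2])) PySem.Dict.empty := by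
      rw [hpos, List.foldl_map]
    rw [hfold, PySem.Dict.getD_foldl_modify_append, PySem.Dict.getD_empty, List.nil_append,
      List.filter_map, List.map_map]
    have : ((fun x : (Char × Int) => x.2) ∘ (fun q : (Int × Char) => (q.2, q.1)))
        = fun q : (Int × Char) => q.1 := rfl
    rw [this]
    have hpred : ((fun p : (Char × Int) => p.1 == c) ∘ (fun q : (Int × Char) => (q.2, q.1)))
        = fun q : (Int × Char) => q.2 == c := rfl
    rw [hpred]
    exact enum_occ l c 0
  have hitems : pos.items = (PySem.Set.ofList l).map (fun c => (c, occInt l c)) := by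
    rw [PySem.Dict.items_eq_map_keys pos hnodup [], hkeys]
    exact List.map_congr_left (fun c _ => by rw [hget])
  rw [hitems, List.foldl_map]
  have hstep : (fun (cand : List (Char × Int)) (c : Char) =>
        if 2 ≤ ((c, occInt l c)).2.length then cand ++ [(((c, occInt l c)).1, bSegLen ((c, occInt l c)).2)] else cand)
      = fun cand c => if 2 ≤ (occInt l c).length then cand ++ [(c, bSegLen (occInt l c))] else cand := rfl
  rw [hstep, PySem.List.foldl_append_ite (fun c => 2 ≤ (occInt l c).length)
    (fun c => (c, bSegLen (occInt l c)))]
  rw [List.nil_append]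
  rfl

def lensA (l : List Char) : List Int := (l.flatMap (segSpec l)).map (fun s => (s.length : Int))

theorem occInt_len (l : List Char) (c : Char) : (occInt l c).length = (occList l c 0).length := by
  unfold occInt; simp

theorem mem_lensA {l : List Char} {y : Int} : y ∈ lensA l ↔ ∃ c ∈ l, y ∈ mLens l c := by
  unfold lensA
  rw [List.map_flatMap]
  have h : (fun c => (segSpec l c).map (fun s => (s.length : Int))) = fun c => mLens l c :=
    funext (seg_lens l)
  rw [h]
  simp [List.mem_flatMap]

theorem mem_candVals {l : List Char} {y : Int} :
    y ∈ (candB l).map (fun p => p.2) ↔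
      ∃ c, c ∈ l ∧ 2 ≤ (occList l c 0).length ∧ y = bSegLen (occInt l c) := by
  unfold candB
  simp only [List.map_map, List.mem_map, List.mem_filter, PySem.Set.mem_ofList,
    Function.comp_def, decide_eq_true_eq, occInt_len]
  constructor
  · rintro ⟨c, ⟨hcl, h2⟩, hy⟩; exact ⟨c, hcl, h2, hy.symm⟩
  · rintro ⟨c, hcl, h2, hy⟩; exact ⟨c, ⟨hcl, h2⟩, hy.symm⟩

theorem nil_iff (l : List Char) : l.flatMap (segSpec l) = [] ↔ candB l = [] := by
  rw [List.flatMap_eq_nil_iff]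
  unfold candB
  rw [List.map_eq_nil_iff, List.filter_eq_nil_iff]
  constructor
  · intro h c hc
    have h1 := (segSpec_nil_iff l c).1 (h c ((PySem.Set.mem_ofList l c).1 hc))
    simp only [decide_eq_true_eq, occInt_len]
    omega
  · intro h c hc
    apply (segSpec_nil_iff l c).2
    have h1 := h c ((PySem.Set.mem_ofList l c).2 hc)
    simp only [decide_eq_true_eq, occInt_len] at h1
    omega

theorem maxx_eq_best (l : List Char) (hnil : l.flatMap (segSpec l) ≠ []) :
    (PySem.List.max? (lensA l) (fun y => y)).getD 0
      = (PySem.List.max? ((candB l).map (fun p => p.2)) (fun y => y)).getD 0 := by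
  have hlens : lensA l ≠ [] := by unfold lensA; simpa using hnil
  have hcand : candB l ≠ [] := fun h => hnil ((nil_iff l).2 h)
  have hcv : (candB l).map (fun p => p.2) ≠ [] := by simpa using hcand
  obtain ⟨mA, hA⟩ : ∃ m, PySem.List.max? (lensA l) (fun y => y) = some m := by
    cases h : PySem.List.max? (lensA l) (fun y => y) with
    | none => exact absurd ((PySem.List.max?_eq_none_iff _ _).1 h) hlens
    | some m => exact ⟨m, rfl⟩
  obtain ⟨mB, hB⟩ : ∃ m, PySem.List.max? ((candB l).map (fun p => p.2)) (fun y => y) = some m := by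
    cases h : PySem.List.max? ((candB l).map (fun p => p.2)) (fun y => y) with
    | none => exact absurd ((PySem.List.max?_eq_none_iff _ _).1 h) hcv
    | some m => exact ⟨m, rfl⟩
  rw [hA, hB, Option.getD_some, Option.getD_some]
  have hAmem := PySem.List.max?_mem hA
  have hAmax := PySem.List.max?_isMax hA
  have hBmem := PySem.List.max?_mem hB
  have hBmax := PySem.List.max?_isMax hB
  apply le_antisymm
  · rcases mem_lensA.1 hAmem with ⟨c, hcl, hcm⟩
    have h2 : 2 ≤ (occList l c 0).length := (mLens_ne_nil_iff l c).1 (List.ne_nil_of_mem hcm)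
    obtain ⟨hmem', hmax'⟩ := bSegLen_spec h2
    calc mA ≤ bSegLen (occInt l c) := hmax' _ hcm
    _ ≤ mB := hBmax _ (mem_candVals.2 ⟨c, hcl, h2, rfl⟩)
  · rcases mem_candVals.1 hBmem with ⟨c, hcl, h2, hy⟩
    obtain ⟨hmem', _⟩ := bSegLen_spec h2
    exact hy ▸ hAmax _ (mem_lensA.2 ⟨c, hcl, hmem'⟩)

theorem blist_eq (l : List Char) (best : Int) :
    ((candB l).filter (fun p => p.2 == best)).map (fun p => p.1)
      = (((PySem.Set.ofList l).filter (fun c => decide (2 ≤ (occInt l c).length))).filter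
          (fun c => bSegLen (occInt l c) == best)) := by
  unfold candB
  rw [List.filter_map, List.map_map]
  have h1 : ((fun p : Char × Int => p.2 == best) ∘ fun c => (c, bSegLen (occInt l c)))
      = fun c => bSegLen (occInt l c) == best := rfl
  have h2 : ((fun p : Char × Int => p.1) ∘ fun c : Char => (c, bSegLen (occInt l c)))
      = fun c : Char => c := rfl
  rw [h1, h2, List.map_id']

theorem mem_final (l : List Char) (M : Int) (hbound : ∀ y ∈ lensA l, y ≤ M) (ch : Char) :
    (ch ∈ PySem.Set.ofList (((l.flatMap (segSpec l)).filter
        (fun sub => (sub.length : Int) == M)).map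
        (fun sub => (PySem.List.pyGet? sub 0).getD ' ')))
    ↔ (ch ∈ (((PySem.Set.ofList l).filter (fun c => decide (2 ≤ (occInt l c).length))).filter
        (fun c => bSegLen (occInt l c) == M))) := by
  rw [PySem.Set.mem_ofList]
  simp only [List.mem_map, List.mem_filter, List.mem_flatMap, PySem.Set.mem_ofList,
    occInt_len, beq_iff_eq, decide_eq_true_eq]
  constructor
  · rintro ⟨sub, ⟨⟨c, hcl, hsub⟩, hlen⟩, hhead⟩
    have hch : c = ch := by rw [← hhead, seg_head hsub]
    subst hch
    have hMm : M ∈ mLens l c := by rw [← seg_lens]; exact List.mem_map.2 ⟨sub, hsub, hlen⟩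
    have h2 : 2 ≤ (occList l c 0).length := (mLens_ne_nil_iff l c).1 (List.ne_nil_of_mem hMm)
    obtain ⟨hmem', hmax'⟩ := bSegLen_spec h2
    exact ⟨⟨hcl, h2⟩, le_antisymm (hbound _ (mem_lensA.2 ⟨c, hcl, hmem'⟩)) (hmax' _ hMm)⟩
  · rintro ⟨⟨hcl, h2⟩, hbest⟩
    obtain ⟨hmem', _⟩ := bSegLen_spec h2
    have hMm : M ∈ mLens l ch := hbest ▸ hmem'
    rw [← seg_lens] at hMm
    rcases List.mem_map.1 hMm with ⟨sub, hsub, hlen⟩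
    exact ⟨sub, ⟨⟨ch, hcl, hsub⟩, hlen⟩, seg_head hsub⟩

-- ===== VERDICT (by name: the statement is the Claim_ definition above) =====
theorem max_separator_spec : Claim_equal_max_separator := by
  intro txt _
  unfold Spec_max_separator max_separator max_separator_alt
  simp only [newA_eq txt.toList, cand_eq txt.toList]
  set L := txt.toList with hL
  by_cases hnil : L.flatMap (segSpec L) = []
  · rw [if_pos (by simp [hnil]), if_pos (by simp [(nil_iff L).1 hnil])]
  · have hcnil : candB L ≠ [] := fun h => hnil ((nil_iff L).2 h)
    rw [if_neg (by simp [hnil]), if_neg (by simp [hcnil])]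
    congr 1
    rw [blist_eq, ← maxx_eq_best L hnil]
    have hlens : lensA L ≠ [] := by unfold lensA; simpa using hnil
    obtain ⟨mA, hA⟩ : ∃ m, PySem.List.max? (lensA L) (fun y => y) = some m := by
      cases h : PySem.List.max? (lensA L) (fun y => y) with
      | none => exact absurd ((PySem.List.max?_eq_none_iff _ _).1 h) hlens
      | some m => exact ⟨m, rfl⟩
    have hbound : ∀ y ∈ lensA L, y ≤ (PySem.List.max? (lensA L) (fun y => y)).getD 0 := by
      intro y hy
      rw [hA, Option.getD_some]
      exact PySem.List.max?_isMax hA _ hy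
    apply PySem.List.sorted_eq_sorted_of_perm _ _ _ (fun a b h => h)
    refine (List.perm_ext_iff_of_nodup (PySem.Set.nodup_ofList _)
      (List.Nodup.filter _ (List.Nodup.filter _ (PySem.Set.nodup_ofList _)))).2 ?_
    intro ch
    exact mem_final L _ hbound ch
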